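-- pv_equiv track=rewrite | github.com/ShafiBotAI/CreatorCoreForge | generated/CoreForgeVisual/Detect_speaker_shifts_and_auto_adjust_scene_framing_camera_position.py | detect_speaker_shifts
-- ===== SOURCE A (Python) =====
-- from typing import List, Tuple
--
-- def detect_speaker_shifts(script: List[Tuple[str, str]]) -> List[int]:
--     """Return indices in ``script`` where the speaker changes."""
--     shifts = []
--     last_speaker = None
--     for i, (speaker, _) in enumerate(script):
--         if last_speaker is not None and speaker != last_speaker:
--             shifts.append(i)
--         last_speaker = speaker
--     return shifts
-- ===== SOURCE B (Python) =====
-- from itertools import groupby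
--
--
-- def detect_speaker_shifts(script):
--     """Return indices in ``script`` where the speaker changes.
--
--     Walks maximal runs of consecutive identical speakers via itertools.groupby,
--     recording the running offset at the start of every group after the first.
--     """
--     shifts = []
--     offset = 0
--     for idx, (_, group) in enumerate(groupby(script, key=lambda x: x[0])):
--         if idx > 0:
--             shifts.append(offset)
--         offset += sum(1 for _ in group)
--     return shifts
-- ===== Notes on version B (the rewrite author's own statement) =====
-- stated objective: alternative
-- what changed: B iterates over maximal runs of equal speakers with itertools.groupby, maintaining a running offset and emitting the offset at each non-first group start, instead of A's element-by-element loop with a previous-speaker accumulator.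
import Mathlib
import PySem

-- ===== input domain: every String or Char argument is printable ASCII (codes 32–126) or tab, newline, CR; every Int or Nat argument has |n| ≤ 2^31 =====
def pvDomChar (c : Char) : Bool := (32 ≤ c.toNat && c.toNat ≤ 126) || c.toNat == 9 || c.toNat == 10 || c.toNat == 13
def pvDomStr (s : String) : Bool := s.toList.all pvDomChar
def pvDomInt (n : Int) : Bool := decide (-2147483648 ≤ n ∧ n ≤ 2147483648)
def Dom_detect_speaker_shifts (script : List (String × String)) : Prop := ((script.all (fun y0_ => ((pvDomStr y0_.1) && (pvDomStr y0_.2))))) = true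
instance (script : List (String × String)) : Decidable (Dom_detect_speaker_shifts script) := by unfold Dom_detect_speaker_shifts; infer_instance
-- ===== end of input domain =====

-- B walks maximal runs of equal speakers (groupby) with a running offset instead of
-- A's per-element loop with a previous-speaker accumulator; same cost, different structure.


-- ===== PORT A =====
-- A's for-loop with state (shifts, last_speaker, i) as a structural recursion over the list.
def detectGoA (shifts : List Int) (last : Option String) (i : Int) :
    List (String × String) → List Int
  | [] => shifts
  | (sp, _) :: rest =>
      let shifts' := if last.isSome ∧ some sp ≠ last then shifts ++ [i] else shifts
      detectGoA shifts' (some sp) (i + 1) rest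

def detect_speaker_shifts (script : List (String × String)) : List Int :=
  detectGoA [] none 0 script

-- ===== PORT B =====
-- length of the maximal leading run of speaker s (the part of a groupby group after its head)
def runLen (s : String) : List (String × String) → Nat
  | [] => 0
  | (sp, _) :: rest => if sp = s then runLen s rest + 1 else 0

-- remaining groups: each call consumes one whole group, emitting its start offset
def detectGoB (off : Int) (xs : List (String × String)) : List Int :=
  match xs with
  | [] => []
  | (sp, _) :: rest =>
      off :: detectGoB (off + 1 + (runLen sp rest : Int)) (rest.drop (runLen sp rest))
termination_by xs.length
decreasing_by
  simp only [List.length_drop, List.length_cons]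
  omega

def detect_speaker_shifts_alt (script : List (String × String)) : List Int :=
  match script with
  | [] => []
  | (sp, _) :: rest =>
      detectGoB (1 + (runLen sp rest : Int)) (rest.drop (runLen sp rest))

-- ===== PRECONDITION & SPEC =====
def Spec_detect_speaker_shifts (script : List (String × String)) (out : List Int) : Prop := out = detect_speaker_shifts_alt script
instance (script : List (String × String)) (out : List Int) : Decidable (Spec_detect_speaker_shifts script out) := by unfold Spec_detect_speaker_shifts; infer_instance

-- ===== CLAIM (what is proved, stated in full; the proofs are below) =====
def Claim_equal_detect_speaker_shifts : Prop := ∀ (script : List (String × String)), Dom_detect_speaker_shifts script → Spec_detect_speaker_shifts script (detect_speaker_shifts script)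

-- ===== LEMMAS AND PROOFS =====

-- proof intermediate: shifts emitted when the previous speaker is s and the next index is i
def contFrom (s : String) (i : Int) : List (String × String) → List Int
  | [] => []
  | (sp, _) :: rest => if sp = s then contFrom s (i + 1) rest else i :: contFrom sp (i + 1) rest

theorem detectGoA_eq_contFrom (xs : List (String × String)) :
    ∀ (acc : List Int) (s : String) (i : Int),
      detectGoA acc (some s) i xs = acc ++ contFrom s i xs := by
  induction xs with
  | nil => intro acc s i; simp [detectGoA, contFrom]
  | cons hd tl ih =>
      intro acc s i
      obtain ⟨sp, t⟩ := hd
      by_cases h : sp = s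
      · subst h; simp [detectGoA, contFrom, ih]
      · simp [detectGoA, contFrom, h, ih, List.append_assoc]

theorem runLen_le (s : String) (xs : List (String × String)) : runLen s xs ≤ xs.length := by
  induction xs with
  | nil => simp [runLen]
  | cons hd tl ih =>
      obtain ⟨sp, t⟩ := hd
      simp only [runLen, List.length_cons]
      split <;> omega

-- the element just after the maximal leading run of s has a different speaker
theorem head_drop_runLen (s : String) (xs : List (String × String)) :
    ∀ p, (xs.drop (runLen s xs)).head? = some p → p.1 ≠ s := by
  induction xs with
  | nil => intro p h; simp at h
  | cons hd tl ih =>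
      obtain ⟨sp, t⟩ := hd
      intro p h
      by_cases hs : sp = s
      · subst hs
        simp only [runLen] at h
        exact ih p h
      · simp only [runLen, if_neg hs, List.drop_zero, List.head?_cons,
          Option.some.injEq] at h
        subst h; exact hs

-- skipping a leading run of the current speaker emits nothing
theorem contFrom_skip_run (xs : List (String × String)) :
    ∀ (s : String) (i : Int),
      contFrom s i xs = contFrom s (i + (runLen s xs : Int)) (xs.drop (runLen s xs)) := by
  induction xs with
  | nil => intro s i; simp [runLen]
  | cons hd tl ih =>
      intro s i
      obtain ⟨sp, t⟩ := hd
      by_cases h : sp = s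
      · subst h
        simp only [contFrom, runLen, if_true]
        rw [ih, List.drop_succ_cons]
        congr 1
        push_cast
        ring
      · simp [runLen, h]

-- detectGoB computes contFrom whenever the next element starts a fresh group
theorem detectGoB_eq_contFrom (n : Nat) :
    ∀ (xs : List (String × String)), xs.length ≤ n →
      ∀ (s : String) (off : Int), (∀ p, xs.head? = some p → p.1 ≠ s) →
        detectGoB off xs = contFrom s off xs := by
  induction n with
  | zero =>
      intro xs hlen s off _
      have : xs = [] := List.length_eq_zero_iff.mp (Nat.le_zero.mp hlen)
      subst this; simp [detectGoB, contFrom]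
  | succ n ih =>
      intro xs hlen s off hfresh
      match xs with
      | [] => simp [detectGoB, contFrom]
      | (sp, t) :: rest =>
          have hne : sp ≠ s := hfresh (sp, t) (by simp)
          have hlen' : (rest.drop (runLen sp rest)).length ≤ n := by
            have := runLen_le sp rest
            simp only [List.length_cons] at hlen
            simp only [List.length_drop]
            omega
          have hB : detectGoB off ((sp, t) :: rest)
              = off :: detectGoB (off + 1 + (runLen sp rest : Int)) (rest.drop (runLen sp rest)) := by
            rw [detectGoB]
          have hC : contFrom s off ((sp, t) :: rest) = off :: contFrom sp (off + 1) rest := by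
            simp [contFrom, hne]
          rw [hB, hC, contFrom_skip_run rest sp (off + 1),
            ih _ hlen' sp _ (head_drop_runLen sp rest)]

-- ===== VERDICT (by name: the statement is the Claim_ definition above) =====
theorem detect_speaker_shifts_spec : Claim_equal_detect_speaker_shifts := by
  intro script _
  unfold Spec_detect_speaker_shifts
  match script with
  | [] => rfl
  | (sp, t) :: rest =>
      have h1 : detect_speaker_shifts ((sp, t) :: rest) = detectGoA [] (some sp) 1 rest := by
        simp [detect_speaker_shifts, detectGoA]
      have h2 : detect_speaker_shifts_alt ((sp, t) :: rest)
          = detectGoB (1 + (runLen sp rest : Int)) (rest.drop (runLen sp rest)) := rfl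
      rw [h1, h2, detectGoA_eq_contFrom, List.nil_append, contFrom_skip_run rest sp 1,
        detectGoB_eq_contFrom (rest.drop (runLen sp rest)).length _ le_rfl sp _
          (head_drop_runLen sp rest)]
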